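-- pv_equiv track=rewrite | github.com/Bellamy-spec/dormitory_manager | dm/dm/views.py | sep_three
-- ===== SOURCE A (Python) =====
-- def sep_three(li):
--     """将给定列表分为三个一组"""
--     # 输出列表
--     output_list, small_list = [], []
--
--     # 原列表先排序
--     li.sort()
--
--     # 保证遍历次数为3的倍数且能覆盖所有元素
--     if len(li) % 3:
--         total = (len(li) // 3 + 1) * 3
--     else:
--         total = len(li)
--
--     for i in range(total):
--         if i % 3 == 0:
--             # 重置小列表
--             small_list = []
--
--         # 加入元素
--         try:
--             small_list.append(li[i])
--         except IndexError:
--             # 末尾空白元素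
--             small_list.append('')
--
--         if i % 3 == 2:
--             # 小列表已满，加入大列表
--             output_list.append(small_list)
--
--     return output_list
-- ===== SOURCE B (Python) =====
-- def sep_three(li):
--     """将给定列表分为三个一组"""
--     li.sort()
--     output = []
--     for i in range(0, len(li), 3):
--         chunk = li[i:i + 3]
--         while len(chunk) < 3:
--             chunk.append('')
--         output.append(chunk)
--     return output
-- ===== Notes on version B (the rewrite author's own statement) =====
-- stated objective: simpler
-- what changed: Replaces A's padded index loop over a rounded-up range (with i%3 resets and try/except IndexError padding) by a stride-3 loop that slices each chunk directly and pads it to length 3.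
import Mathlib
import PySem

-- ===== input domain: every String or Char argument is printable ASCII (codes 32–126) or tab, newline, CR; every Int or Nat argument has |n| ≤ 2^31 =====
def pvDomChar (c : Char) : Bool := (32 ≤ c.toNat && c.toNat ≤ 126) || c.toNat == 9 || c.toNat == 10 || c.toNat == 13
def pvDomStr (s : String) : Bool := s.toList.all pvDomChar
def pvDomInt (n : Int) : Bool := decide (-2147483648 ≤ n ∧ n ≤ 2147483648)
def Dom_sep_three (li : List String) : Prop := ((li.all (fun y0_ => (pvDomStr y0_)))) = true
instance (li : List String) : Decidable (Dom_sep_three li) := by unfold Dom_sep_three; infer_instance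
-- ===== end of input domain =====

-- B replaces A's padded index loop (rounded-up range, i%3 resets, try/except padding) by a
-- stride-3 loop over chunk starts with a slice and explicit padding: simpler.
-- Both Pythons sort the argument list in place; B performs the same mutation, and the
-- equivalence proved here is about the return value.

-- ===== PORT A =====
def sep_three (li : List String) : List (List String) :=
  let s := PySem.List.sorted li (fun x => x) false
  let total : Int :=
    if PySem.Int.mod (s.length : Int) 3 ≠ 0 then
      (PySem.Int.floordiv (s.length : Int) 3 + 1) * 3
    else (s.length : Int)
  let r := (PySem.List.pyRange 0 total 1).foldl
    (fun (st : List (List String) × List String) (i : Int) =>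
      let small : List String := if PySem.Int.mod i 3 = 0 then [] else st.2
      -- try: small_list.append(li[i]) except IndexError: small_list.append('')
      let small := small ++ [(match PySem.List.pyGet? s i with | some x => x | none => "")]
      let output := if PySem.Int.mod i 3 = 2 then st.1 ++ [small] else st.1
      (output, small))
    (([], []) : List (List String) × List String)
  r.1

-- ===== PORT B =====
-- the 'while len(chunk) < 3: chunk.append('')' loop
def padThree (chunk : List String) : List String :=
  if chunk.length < 3 then padThree (chunk ++ [""]) else chunk
termination_by 3 - chunk.length

def sep_three_alt (li : List String) : List (List String) :=
  let s := PySem.List.sorted li (fun x => x) false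
  (PySem.List.pyRange 0 (s.length : Int) 3).foldl
    (fun acc i => acc ++ [padThree (PySem.List.slice s (some i) (some (i + 3)))]) []

-- ===== PRECONDITION & SPEC =====
def Spec_sep_three (li : List String) (out : List (List String)) : Prop := out = sep_three_alt li
instance (li : List String) (out : List (List String)) : Decidable (Spec_sep_three li out) := by unfold Spec_sep_three; infer_instance

-- ===== CLAIM (what is proved, stated in full; the proofs are below) =====
def Claim_equal_sep_three : Prop := ∀ (li : List String), Dom_sep_three li → Spec_sep_three li (sep_three li)

-- ===== LEMMAS AND PROOFS =====

-- element with '' fallback, as A's try/except produces it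
def pvG (s : List String) (i : Nat) : String := (s[i]?).getD ""

theorem pvMod3 (m r : Nat) (h : r < 3) : PySem.Int.mod ((3 * m + r : Nat) : Int) 3 = (r : Int) := by
  simp [PySem.Int.mod, Int.fmod_eq_emod]
  omega

theorem pvGdef (s : List String) (k : Nat) :
    (match PySem.List.pyGet? s (k : Int) with | some x => x | none => "") = pvG s k := by
  rw [PySem.List.pyGet?_natCast]
  cases h : s[k]? <;> simp [pvG, h]

theorem padThree_take (t : List String) (h : t ≠ []) :
    padThree (t.take 3) = [t.getD 0 "", t.getD 1 "", t.getD 2 ""] := by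
  match t with
  | [] => exact absurd rfl h
  | [a] => simp [padThree.eq_def, List.getD]
  | [a, b] => simp [padThree.eq_def, List.getD]
  | a :: b :: c :: r => simp [padThree.eq_def, List.getD, List.take]

-- A's loop body, over a Nat index
def pvStepN (s : List String) (st : List (List String) × List String) (k : Nat) :
    List (List String) × List String :=
  let small : List String := if PySem.Int.mod ((k : Nat) : Int) 3 = 0 then [] else st.2
  let small := small ++ [(match PySem.List.pyGet? s ((k : Nat) : Int) with | some x => x | none => "")]
  let output := if PySem.Int.mod ((k : Nat) : Int) 3 = 2 then st.1 ++ [small] else st.1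
  (output, small)

-- A's loop over range(3*m) produces the m chunks of indexed elements (with '' past the end)
theorem aloop (s : List String) (m : Nat) :
    ((List.range (3 * m)).foldl (pvStepN s)
      (([], []) : List (List String) × List String)).1
    = (List.range m).map (fun j => [pvG s (3 * j), pvG s (3 * j + 1), pvG s (3 * j + 2)]) := by
  induction m with
  | zero => simp
  | succ m ih =>
    have e0 : PySem.Int.mod ((3 * m : Nat) : Int) 3 = 0 := by
      simp [PySem.Int.mod, Int.fmod_eq_emod]
    have e1 : PySem.Int.mod ((3 * m + 1 : Nat) : Int) 3 = 1 := pvMod3 m 1 (by omega)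
    have e2 : PySem.Int.mod ((3 * m + 1 + 1 : Nat) : Int) 3 = 2 := by
      have h := pvMod3 m 2 (by omega)
      have h' : 3 * m + 1 + 1 = 3 * m + 2 := by omega
      rw [h']; exact h
    have h3 : 3 * (m + 1) = (3 * m) + 1 + 1 + 1 := by omega
    rw [h3, List.range_succ, List.range_succ, List.range_succ, List.foldl_append,
      List.foldl_append, List.foldl_append]
    set st := (List.range (3 * m)).foldl (pvStepN s)
      (([], []) : List (List String) × List String) with hst
    simp only [List.foldl_cons, List.foldl_nil, pvStepN, pvGdef, e0, e1, e2]
    norm_num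
    rw [ih, List.range_succ, List.map_append]
    simp

theorem ports_eq (li : List String) : sep_three li = sep_three_alt li := by
  unfold sep_three sep_three_alt
  generalize PySem.List.sorted li (fun x => x) false = s
  show ((PySem.List.pyRange 0
      (if PySem.Int.mod (s.length : Int) 3 ≠ 0 then
        (PySem.Int.floordiv (s.length : Int) 3 + 1) * 3
      else (s.length : Int)) 1).foldl
    (fun (st : List (List String) × List String) (i : Int) =>
      let small : List String := if PySem.Int.mod i 3 = 0 then [] else st.2
      let small := small ++ [(match PySem.List.pyGet? s i with | some x => x | none => "")]
      let output := if PySem.Int.mod i 3 = 2 then st.1 ++ [small] else st.1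
      (output, small))
    (([], []) : List (List String) × List String)).1
    = (PySem.List.pyRange 0 (s.length : Int) 3).foldl
        (fun acc i => acc ++ [padThree (PySem.List.slice s (some i) (some (i + 3)))]) []
  have htot : (if PySem.Int.mod (s.length : Int) 3 ≠ 0 then
        (PySem.Int.floordiv (s.length : Int) 3 + 1) * 3
      else (s.length : Int)) = ((3 * ((s.length + 2) / 3) : Nat) : Int) := by
    simp only [PySem.Int.mod, PySem.Int.floordiv, Int.fmod_eq_emod, Int.fdiv_eq_ediv]
    split_ifs <;> omega
  rw [htot, PySem.List.pyRange_zero_natCast, List.foldl_map]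
  have hrange : PySem.List.pyRange 0 (s.length : Int) 3
      = (List.range ((s.length + 2) / 3)).map (fun k => ((3 * k : Nat) : Int)) := by
    rw [PySem.List.pyRange_of_pos 0 ((s.length : Nat) : Int) (s := 3) (by norm_num)]
    have hc : (if (0 : Int) < (s.length : Int) then
        (((s.length : Int) - 0 + 3 - 1) / 3).toNat else 0) = (s.length + 2) / 3 := by
      split_ifs <;> omega
    rw [hc]
    apply List.map_congr_left
    intro k _
    push_cast
    ring
  rw [hrange, List.foldl_map, PySem.List.foldl_append_singleton_eq_map]
  show ((List.range (3 * ((s.length + 2) / 3))).foldl (pvStepN s)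
      (([], []) : List (List String) × List String)).1 = _
  rw [aloop]
  simp only [List.nil_append]
  apply List.map_congr_left
  intro k hk
  rw [List.mem_range] at hk
  have h3k : 3 * k < s.length := by omega
  have hcast : ((3 * k : Nat) : Int) + 3 = ((3 * k : Nat) : Int) + ((3 : Nat) : Int) := by
    norm_num
  rw [hcast, PySem.List.slice_natCast_add]
  have hne : s.drop (3 * k) ≠ [] := by
    simp only [ne_eq, List.drop_eq_nil_iff]
    omega
  rw [padThree_take _ hne]
  simp [pvG, List.getD_eq_getElem?_getD, List.getElem?_drop]

-- ===== VERDICT (by name: the statement is the Claim_ definition above) =====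
theorem sep_three_spec : Claim_equal_sep_three := by
  unfold Claim_equal_sep_three Spec_sep_three
  intro li _
  exact ports_eq li
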